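-- pv_equiv track=rewrite | github.com/leduclean/PROJET-RDN | exercice3/exercice3.py | convolution1D_stride
-- ===== SOURCE A (Python) =====
-- def convolution1D_stride(X: list, F: list, k: int) -> list:
--     """
--     Effectue une convolution 1D avec un pas (stride) k.
--
--     Paramètres:
--         X (list): Données à convoluer (taille : N).
--         F (list): Filtre à appliquer (taille : H).
--         k (int): Facteur de stride (décalage entre chaque application du filtre).
--
--     Retourne:
--         list: Résultat de la convolution avec stride (taille approximative : (N - H) // k + 1).
--     """
--     N, H = len(X), len(F)
--     Z = []
--     for i in range((N - H) // k + 1):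
--         zi = 0
--         for h in range(H):
--             zi += X[i * k + (H - 1) - h] * F[h]
--         Z.append(zi)
--     return Z
-- ===== SOURCE B (Python) =====
-- def convolution1D_stride(X: list, F: list, k: int) -> list:
--     """Strided 1D convolution, computed as a scatter: the filter tap is the
--     outer loop and each tap's contribution is accumulated into the whole
--     output array, instead of gathering each output value independently."""
--     N, H = len(X), len(F)
--     M = (N - H) // k + 1
--     Z = [0] * M
--     for h in range(H):
--         f = F[h]
--         for i in range(M):
--             Z[i] += X[i * k + (H - 1) - h] * f
--     return Z
-- ===== Notes on version B (the rewrite author's own statement) =====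
-- stated objective: alternative
-- what changed: Gather (compute each output value completely, then append) replaced by a scatter: the output array is allocated up front and the filter tap becomes the outer loop, accumulating each tap's contribution across the whole output array.
import Mathlib
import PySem

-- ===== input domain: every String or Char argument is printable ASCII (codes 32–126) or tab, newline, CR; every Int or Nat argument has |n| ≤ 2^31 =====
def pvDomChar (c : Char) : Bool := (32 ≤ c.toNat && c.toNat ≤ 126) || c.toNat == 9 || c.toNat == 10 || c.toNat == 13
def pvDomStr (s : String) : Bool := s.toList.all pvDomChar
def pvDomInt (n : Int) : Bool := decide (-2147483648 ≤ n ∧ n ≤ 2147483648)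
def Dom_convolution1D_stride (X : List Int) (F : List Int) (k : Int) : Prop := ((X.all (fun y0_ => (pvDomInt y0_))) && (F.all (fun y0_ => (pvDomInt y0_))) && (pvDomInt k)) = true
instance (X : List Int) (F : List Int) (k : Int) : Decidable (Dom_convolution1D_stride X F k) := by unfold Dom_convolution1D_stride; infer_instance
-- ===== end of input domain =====

-- B reorganises the same strided convolution: the gather (compute each output, append) becomes
-- a scatter over a preallocated output with the filter tap as the outer loop; same return value.

-- ===== PORT A =====
-- Gather: for each output index i, compute zi by the inner tap loop, then append it.
def convolution1D_stride (X : List Int) (F : List Int) (k : Int) : List Int :=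
  let N : Int := X.length
  let H : Int := F.length
  (PySem.List.pyRange 0 (PySem.Int.floordiv (N - H) k + 1) 1).foldl
    (fun Z i =>
      Z ++ [(PySem.List.pyRange 0 H 1).foldl
              (fun zi h =>
                zi + PySem.List.pyGetD X (i * k + (H - 1) - h) 0 * PySem.List.pyGetD F h 0)
              0])
    []

-- ===== PORT B =====
-- Scatter: allocate Z = [0]*M, tap h is the outer loop, accumulate into each Z[i].
def convolution1D_stride_alt (X : List Int) (F : List Int) (k : Int) : List Int :=
  let N : Int := X.length
  let H : Int := F.length
  let M : Int := PySem.Int.floordiv (N - H) k + 1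
  (PySem.List.pyRange 0 H 1).foldl
    (fun Z h =>
      let f := PySem.List.pyGetD F h 0
      (PySem.List.pyRange 0 M 1).foldl
        (fun Z i =>
          PySem.List.pySetD Z i
            (PySem.List.pyGetD Z i 0 + PySem.List.pyGetD X (i * k + (H - 1) - h) 0 * f))
        Z)
    (List.replicate M.toNat 0)

-- ===== PRECONDITION & SPEC =====
-- Pre_ excludes exactly the inputs where the Python A raises: k = 0 (ZeroDivisionError) and
-- k < 0 with 0 < len(F) and len(X) < len(F) (IndexError on the first output index).
def Pre_convolution1D_stride (X : List Int) (F : List Int) (k : Int) : Prop :=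
  k ≠ 0 ∧ (0 < k ∨ (F.length : Int) ≤ (X.length : Int) ∨ F.length = 0)
instance (X : List Int) (F : List Int) (k : Int) : Decidable (Pre_convolution1D_stride X F k) := by
  unfold Pre_convolution1D_stride; infer_instance

def pvWitness_convolution1D_stride : List Int × List Int × Int := ([1, 2, 3, 4, 5], [1, 0, -1], 2)

def Spec_convolution1D_stride (X : List Int) (F : List Int) (k : Int) (out : List Int) : Prop := out = convolution1D_stride_alt X F k
instance (X : List Int) (F : List Int) (k : Int) (out : List Int) : Decidable (Spec_convolution1D_stride X F k out) := by unfold Spec_convolution1D_stride; infer_instance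

-- ===== CLAIM (what is proved, stated in full; the proofs are below) =====
def Claim_equal_convolution1D_stride : Prop := ∀ (X : List Int) (F : List Int) (k : Int), Dom_convolution1D_stride X F k → Pre_convolution1D_stride X F k → Spec_convolution1D_stride X F k (convolution1D_stride X F k)

-- ===== LEMMAS AND PROOFS =====

-- B's inner loop over a suffix Z sitting behind a prefix P it never touches:
-- element n of Z gains t (P.length + n).
theorem pv_inner_scatter (t : Int → Int) :
    ∀ (Z P : List Int),
      (PySem.List.pyRange (P.length : Int) ((P.length : Int) + (Z.length : Int)) 1).foldl
        (fun W i => PySem.List.pySetD W i (PySem.List.pyGetD W i 0 + t i)) (P ++ Z)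
      = P ++ Z.mapIdx (fun n z => z + t ((P.length : Int) + (n : Int))) := by
  intro Z
  induction Z with
  | nil => intro P; simp [PySem.List.pyRange_one_eq_nil]
  | cons z Z ih =>
    intro P
    rw [PySem.List.pyRange_one_cons (by simp)]
    simp only [List.foldl_cons]
    have hget : PySem.List.pyGetD (P ++ z :: Z) (P.length : Int) 0 = z := by
      simp [List.getD]
    have hset : PySem.List.pySetD (P ++ z :: Z) (P.length : Int) (z + t (P.length : Int))
        = (P ++ [z + t (P.length : Int)]) ++ Z := by
      rw [PySem.List.pySetD_natCast, List.set_append]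
      simp
    rw [hget, hset]
    have hlen : ((P.length : Int) + 1) = (((P ++ [z + t (P.length : Int)]).length : Int)) := by
      simp
    have hlen2 : (P.length : Int) + ((z :: Z).length : Int)
        = ((P ++ [z + t (P.length : Int)]).length : Int) + (Z.length : Int) := by
      simp; omega
    rw [hlen, hlen2, ih]
    have hfun : (fun (n : Nat) (z' : Int) => z' + t (((P ++ [z + t (P.length : Int)]).length : Int) + (n : Int)))
        = (fun (n : Nat) (z' : Int) => z' + t ((P.length : Int) + ((n + 1 : Nat) : Int))) := by
      funext n z'
      congr 1
      congr 1
      simp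
      ring
    rw [hfun]
    simp [List.mapIdx_cons]

-- B's inner loop when the current output array is a map over List.range.
theorem pv_inner_scatter_map (t : Int → Int) (m : Nat) (c : Nat → Int) :
    (PySem.List.pyRange 0 (m : Int) 1).foldl
      (fun W i => PySem.List.pySetD W i (PySem.List.pyGetD W i 0 + t i)) ((List.range m).map c)
    = (List.range m).map (fun n => c n + t (n : Int)) := by
  have h := pv_inner_scatter t ((List.range m).map c) []
  simp only [List.length_nil, Nat.cast_zero, zero_add, List.nil_append, List.length_map,
    List.length_range] at h
  rw [h]
  apply List.ext_getElem
  · simp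
  · intro i h1 h2
    simp

-- B's outer loop: folding taps hs over a map keeps it a map, with the per-index fold inside.
theorem pv_outer_scatter (term : Int → Int → Int) (m : Nat) :
    ∀ (hs : List Int) (c : Nat → Int),
      hs.foldl
        (fun Z h =>
          (PySem.List.pyRange 0 (m : Int) 1).foldl
            (fun W i => PySem.List.pySetD W i (PySem.List.pyGetD W i 0 + term i h)) Z)
        ((List.range m).map c)
      = (List.range m).map (fun n => hs.foldl (fun zi h => zi + term ((n : Nat) : Int) h) (c n)) := by
  intro hs
  induction hs with
  | nil => intro c; simp
  | cons h hs ih =>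
    intro c
    simp only [List.foldl_cons]
    rw [pv_inner_scatter_map (fun i => term i h) m c, ih]

theorem pv_range_toNat (M : Int) : PySem.List.pyRange 0 M 1 = PySem.List.pyRange 0 ((M.toNat : Nat) : Int) 1 := by
  by_cases h : 0 ≤ M
  · rw [Int.toNat_of_nonneg h]
  · rw [PySem.List.pyRange_one_eq_nil (by omega), PySem.List.pyRange_one_eq_nil (by omega)]

-- The two ports agree on every input (the precondition only marks where the Python A raises).
theorem pv_ports_eq (X F : List Int) (k : Int) :
    convolution1D_stride X F k = convolution1D_stride_alt X F k := by
  simp only [convolution1D_stride, convolution1D_stride_alt]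
  set H : Int := (F.length : Int)
  set M : Int := PySem.Int.floordiv ((X.length : Int) - H) k + 1
  rw [PySem.List.foldl_append_singleton_eq_map]
  have hrep : List.replicate M.toNat (0 : Int) = (List.range M.toNat).map (fun _ => (0:Int)) := by
    simp
  rw [hrep, pv_range_toNat M,
    pv_outer_scatter (fun i h => PySem.List.pyGetD X (i * k + (H - 1) - h) 0 * PySem.List.pyGetD F h 0) M.toNat,
    PySem.List.pyRange_zero_nat, PySem.List.pyRange_zero_nat, List.map_map]
  simp

-- ===== VERDICT (by name: the statement is the Claim_ definition above) =====
theorem convolution1D_stride_spec : Claim_equal_convolution1D_stride := by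
  intro X F k _ _
  unfold Spec_convolution1D_stride
  exact pv_ports_eq X F k
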